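-- pv_equiv track=rewrite | github.com/dwheelerau/modules | CDS_functions.py | slice_sequence
-- ===== SOURCE A (Python) =====
-- def slice_sequence(seq_string,CDS_tuple, strand="+"):
--     """just slices a seq string based on cds info [and strand]"""
--     mRNA="" #this should be converted to a seq object??
--     counter = 0
--     if strand!="+":
--         for coord in CDS_tuple:
--             counter+=1
--             st = coord[0]
--             end = coord[1]
--             #need to adjust for genetics counting versus pythonic counting
--             if counter==1:#first segment which is really stop segment
--                 mRNA= mRNA+ seq_string[(int(st)-4):(int(end))]#Rev - add stop!
--             else:
--                 mRNA= mRNA+ seq_string[(int(st)-1):(int(end))]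
--     else:
--         counter = 0
--         num_of_splice = len(CDS_tuple)
--         for coord in CDS_tuple:
--             counter +=1
--             st = coord[0]
--             end = coord[1]
--             #need to adjust for genetics counting versus pythonic counting
--             if counter!=num_of_splice:
--                 mRNA= mRNA+ seq_string[(int(st)-1):(int(end))]
--             else:#last cds there need to catch stop codon
--                 mRNA= mRNA+ seq_string[(int(st)-1):(int(end)+3)]
--     return mRNA
-- ===== SOURCE B (Python) =====
-- def slice_sequence(seq_string, CDS_tuple, strand="+"):
--     """just slices a seq string based on cds info [and strand]"""
--     if strand != "+":
--         return _rev_mrna(seq_string, list(CDS_tuple), True)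
--     return _fwd_mrna(seq_string, list(CDS_tuple))
--
--
-- def _rev_mrna(seq_string, coords, first):
--     # first segment carries the stop codon: start is shifted by 4 instead of 1
--     if not coords:
--         return ""
--     st, end = coords[0]
--     off = 4 if first else 1
--     return seq_string[int(st) - off:int(end)] + _rev_mrna(seq_string, coords[1:], False)
--
--
-- def _fwd_mrna(seq_string, coords):
--     if not coords:
--         return ""
--     st, end = coords[0]
--     if len(coords) == 1:  # last CDS: extend by 3 to catch the stop codon
--         return seq_string[int(st) - 1:int(end) + 3]
--     return seq_string[int(st) - 1:int(end)] + _fwd_mrna(seq_string, coords[1:])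
-- ===== Notes on version B (the rewrite author's own statement) =====
-- stated objective: alternative
-- what changed: Replaces A's single counter-carrying accumulator loop (which compares a running counter against 1 or len inside every iteration) by two strand-specific recursive helpers: the reverse helper recurses with a boolean first-flag folded into one offset (4 vs 1), the forward helper detects the final CDS structurally as the singleton rest, and the result is built by concatenation on return.
import Mathlib
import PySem

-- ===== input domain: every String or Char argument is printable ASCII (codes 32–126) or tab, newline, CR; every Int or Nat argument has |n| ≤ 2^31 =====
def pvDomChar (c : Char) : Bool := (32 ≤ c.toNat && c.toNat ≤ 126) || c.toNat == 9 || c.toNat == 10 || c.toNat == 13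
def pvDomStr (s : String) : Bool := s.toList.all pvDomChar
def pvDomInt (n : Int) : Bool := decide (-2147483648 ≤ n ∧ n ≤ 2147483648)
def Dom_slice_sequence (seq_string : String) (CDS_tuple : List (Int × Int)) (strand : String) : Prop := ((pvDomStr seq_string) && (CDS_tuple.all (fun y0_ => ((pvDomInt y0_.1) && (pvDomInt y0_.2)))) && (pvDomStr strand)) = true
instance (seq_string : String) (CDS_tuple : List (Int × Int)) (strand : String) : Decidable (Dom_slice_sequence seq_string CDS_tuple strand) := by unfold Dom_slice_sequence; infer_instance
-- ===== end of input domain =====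

-- B replaces A's counter-carrying accumulator loop by strand-specific structural recursion
-- (first-flag offset on the reverse strand, singleton-rest test on the forward strand);
-- objective: alternative decomposition, same cost.

-- ===== PORT A =====
-- A, step for step: running mRNA accumulator and counter, one fold per strand branch;
-- string slicing on the code-point list (PySem.Chars) per PYSEM.md.
-- loop body of A's reverse-strand branch
def stepRev (s : List Char) (a : List Char × Int) (coord : Int × Int) : List Char × Int :=
  let counter := a.2 + 1
  if counter = 1 then
    (a.1 ++ PySem.List.slice s (some (coord.1 - 4)) (some coord.2), counter)
  else
    (a.1 ++ PySem.List.slice s (some (coord.1 - 1)) (some coord.2), counter)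

-- loop body of A's forward-strand branch (n = num_of_splice)
def stepFwd (s : List Char) (n : Int) (a : List Char × Int) (coord : Int × Int) : List Char × Int :=
  let counter := a.2 + 1
  if counter ≠ n then
    (a.1 ++ PySem.List.slice s (some (coord.1 - 1)) (some coord.2), counter)
  else
    (a.1 ++ PySem.List.slice s (some (coord.1 - 1)) (some (coord.2 + 3)), counter)

def slice_sequence (seq_string : String) (CDS_tuple : List (Int × Int)) (strand : String) : String :=
  let s := seq_string.toList
  if strand ≠ "+" then
    String.ofList (CDS_tuple.foldl (stepRev s) ([], 0)).1
  else
    let num_of_splice : Int := CDS_tuple.length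
    String.ofList (CDS_tuple.foldl (stepFwd s num_of_splice) ([], 0)).1

-- ===== PORT B =====
-- B, step for step: two recursive helpers, result built by concatenation on return.
-- port of _rev_mrna (the boolean first-flag selects the offset 4 vs 1)
def revMrna (s : List Char) (coords : List (Int × Int)) (first : Bool) : List Char :=
  match coords with
  | [] => []
  | c :: rest =>
    let off : Int := if first then 4 else 1
    PySem.List.slice s (some (c.1 - off)) (some c.2) ++ revMrna s rest false

-- port of _fwd_mrna (the last CDS is the one whose rest is empty)
def fwdMrna (s : List Char) : List (Int × Int) → List Char
  | [] => []
  | [c] => PySem.List.slice s (some (c.1 - 1)) (some (c.2 + 3))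
  | c :: rest => PySem.List.slice s (some (c.1 - 1)) (some c.2) ++ fwdMrna s rest

def slice_sequence_alt (seq_string : String) (CDS_tuple : List (Int × Int)) (strand : String) : String :=
  if strand ≠ "+" then
    String.ofList (revMrna seq_string.toList CDS_tuple true)
  else
    String.ofList (fwdMrna seq_string.toList CDS_tuple)

-- ===== PRECONDITION & SPEC =====
def Spec_slice_sequence (seq_string : String) (CDS_tuple : List (Int × Int)) (strand : String) (out : String) : Prop := out = slice_sequence_alt seq_string CDS_tuple strand
instance (seq_string : String) (CDS_tuple : List (Int × Int)) (strand : String) (out : String) : Decidable (Spec_slice_sequence seq_string CDS_tuple strand out) := by unfold Spec_slice_sequence; infer_instance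

-- ===== CLAIM (what is proved, stated in full; the proofs are below) =====
def Claim_equal_slice_sequence : Prop := ∀ (seq_string : String) (CDS_tuple : List (Int × Int)) (strand : String), Dom_slice_sequence seq_string CDS_tuple strand → Spec_slice_sequence seq_string CDS_tuple strand (slice_sequence seq_string CDS_tuple strand)

-- ===== LEMMAS AND PROOFS =====

-- After the first iteration the counter is ≥ 1, so A's reverse-strand loop keeps taking
-- the else branch and appends exactly what revMrna … false produces.
lemma foldRev_eq (s : List Char) (rest : List (Int × Int)) (acc : List Char) (k : Int)
    (hk : 1 ≤ k) :
    (rest.foldl (stepRev s) (acc, k)).1 = acc ++ revMrna s rest false := by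
  induction rest generalizing acc k with
  | nil => simp [revMrna]
  | cons x t ih =>
    rw [List.foldl_cons,
      show stepRev s (acc, k) x
          = (acc ++ PySem.List.slice s (some (x.1 - 1)) (some x.2), k + 1) from by
        simp [stepRev]; intro h; exact absurd h (by omega),
      ih _ _ (by omega)]
    simp [revMrna]

-- A's forward-strand loop, started at counter k with k + |rest| = n, appends exactly
-- what fwdMrna produces (the counter hits n precisely on the last coordinate).
lemma foldFwd_eq (s : List Char) (rest : List (Int × Int)) (acc : List Char) (k n : Int)
    (h : k + rest.length = n) :
    (rest.foldl (stepFwd s n) (acc, k)).1 = acc ++ fwdMrna s rest := by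
  induction rest generalizing acc k with
  | nil => simp [fwdMrna]
  | cons x t ih =>
    cases t with
    | nil =>
      have hk : k + 1 = n := by simpa using h
      simp [stepFwd, fwdMrna, hk]
    | cons y u =>
      have hlt : k + 1 ≠ n := by
        simp only [List.length_cons] at h; omega
      rw [List.foldl_cons,
        show stepFwd s n (acc, k) x
            = (acc ++ PySem.List.slice s (some (x.1 - 1)) (some x.2), k + 1) from by
          simp only [stepFwd]; simp [hlt],
        ih _ _ (by simp at h ⊢; omega)]
      simp [fwdMrna]

theorem slice_sequence_equal (seq_string : String) (CDS_tuple : List (Int × Int))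
    (strand : String) :
    slice_sequence seq_string CDS_tuple strand = slice_sequence_alt seq_string CDS_tuple strand := by
  simp only [slice_sequence, slice_sequence_alt]
  by_cases hs : strand ≠ "+"
  · rw [if_pos hs, if_pos hs]
    cases CDS_tuple with
    | nil => simp [revMrna]
    | cons c rest =>
      rw [List.foldl_cons,
        show stepRev seq_string.toList ([], 0) c
            = (PySem.List.slice seq_string.toList (some (c.1 - 4)) (some c.2), 1) from by
          simp [stepRev],
        foldRev_eq _ _ _ _ (le_refl 1)]
      simp [revMrna]
  · rw [if_neg hs, if_neg hs,
      foldFwd_eq seq_string.toList CDS_tuple [] 0 (CDS_tuple.length) (by simp)]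
    simp

-- ===== VERDICT (by name: the statement is the Claim_ definition above) =====
theorem slice_sequence_spec : Claim_equal_slice_sequence := by
  intro seq cds strand _
  exact slice_sequence_equal seq cds strand
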